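-- pv_equiv track=rewrite | github.com/ijpatter1/assistonauts | src/assistonauts/tools/compiler.py | _count_sources_from_frontmatter
-- ===== SOURCE A (Python) =====
-- def _count_sources_from_frontmatter(content: str) -> int:
--     """Count source entries in YAML frontmatter."""
--     if not content.startswith("---"):
--         return 0
--     end = content.find("---", 3)
--     if end == -1:
--         return 0
--     frontmatter = content[3:end]
--     # Count lines that look like YAML list items under sources:
--     in_sources = False
--     count = 0
--     for line in frontmatter.split("\n"):
--         stripped = line.strip()
--         if stripped.startswith("sources:"):
--             in_sources = True
--             continue
--         if in_sources:
--             if stripped.startswith("- "):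
--                 count += 1
--             elif stripped and not stripped.startswith("#"):
--                 # New top-level key, stop counting
--                 break
--     return count
-- ===== SOURCE B (Python) =====
-- def _count_sources_from_frontmatter(content: str) -> int:
--     """Count source entries in YAML frontmatter."""
--     if not content.startswith("---"):
--         return 0
--     end = content.find("---", 3)
--     if end == -1:
--         return 0
--     lines = [line.strip() for line in content[3:end].split("\n")]
--     idx = next((k for k, s in enumerate(lines) if s.startswith("sources:")), None)
--     if idx is None:
--         return 0
--     block = []
--     for s in lines[idx + 1:]:
--         if s and not s.startswith("#") and not s.startswith("- "):
--             break
--         block.append(s)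
--     return sum(s.startswith("- ") for s in block)
-- ===== Notes on version B (the rewrite author's own statement) =====
-- stated objective: simpler
-- what changed: Replaces A's stateful flag-and-break loop with a stateless decomposition (strip all lines once, find the first 'sources:' header, take the run of blank/comment/item lines after it, count the items); Pre_ excludes frontmatter with a repeated 'sources:' header line, a duplicate YAML key on which A's continuing to count past the second header is accidental.
-- outside the precondition, e.g. on _count_sources_from_frontmatter('---\nsources:\n- a\nsources:\n- b\n---'): A returns 2, B returns 1
import Mathlib
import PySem

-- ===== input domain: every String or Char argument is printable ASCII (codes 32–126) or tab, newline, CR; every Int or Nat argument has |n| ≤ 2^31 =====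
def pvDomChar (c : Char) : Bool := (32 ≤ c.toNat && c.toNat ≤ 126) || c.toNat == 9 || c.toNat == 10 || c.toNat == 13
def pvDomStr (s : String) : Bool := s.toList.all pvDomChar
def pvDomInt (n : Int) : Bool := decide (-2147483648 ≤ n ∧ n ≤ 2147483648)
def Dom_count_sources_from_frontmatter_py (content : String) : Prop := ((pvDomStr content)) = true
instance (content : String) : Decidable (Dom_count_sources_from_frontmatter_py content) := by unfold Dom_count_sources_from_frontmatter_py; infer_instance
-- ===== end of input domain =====

-- B replaces A's stateful flag-and-break loop by a find-the-header / take-the-block / count decomposition (objective: simpler).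

-- ===== PORT A =====
-- A's for-loop with in_sources flag, count accumulator and break, as structural recursion
def csfLoopA : List String → Bool → Int → Int
  | [], _, count => count
  | line :: rest, inSources, count =>
    let stripped := PySem.Str.strip line
    if PySem.Str.startswith stripped "sources:" = true then
      csfLoopA rest true count
    else if inSources = true then
      if PySem.Str.startswith stripped "- " = true then
        csfLoopA rest inSources (count + 1)
      else if stripped ≠ "" ∧ ¬ (PySem.Str.startswith stripped "#" = true) then
        count  -- break
      else
        csfLoopA rest inSources count
    else
      csfLoopA rest inSources count

def count_sources_from_frontmatter_py (content : String) : Int :=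
  if ¬ (PySem.Str.startswith content "---" = true) then 0
  else
    let e := PySem.Str.findFrom content "---" 3
    if e = -1 then 0
    else
      let frontmatter := PySem.Str.slice content (some 3) (some e)
      csfLoopA ((PySem.Str.split? frontmatter "\n").getD []) false 0

-- ===== PORT B =====
-- Source B's for-loop with break, collecting the run of lines before the first new key
def csfBlock : List String → List String
  | [] => []
  | s :: rest =>
    if s ≠ "" ∧ ¬ (PySem.Str.startswith s "#" = true) ∧ ¬ (PySem.Str.startswith s "- " = true)
    then []  -- break
    else s :: csfBlock rest

def count_sources_from_frontmatter_py_alt (content : String) : Int :=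
  if ¬ (PySem.Str.startswith content "---" = true) then 0
  else
    let e := PySem.Str.findFrom content "---" 3
    if e = -1 then 0
    else
      let lines :=
        ((PySem.Str.split? (PySem.Str.slice content (some 3) (some e)) "\n").getD []).map
          PySem.Str.strip
      match lines.findIdx? (fun s => PySem.Str.startswith s "sources:") with
      | none => 0
      | some i =>
        ((csfBlock (lines.drop (i + 1))).countP
          (fun s => PySem.Str.startswith s "- ") : Int)

-- ===== PRECONDITION & SPEC =====
-- Pre_ excludes frontmatter containing a repeated 'sources:' header line — a duplicate
-- YAML key, on which A's continuing to count across the second header is accidental and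
-- either count is defensible. (Closed-form shape condition on the frontmatter region.)
def Pre_count_sources_from_frontmatter_py (content : String) : Prop :=
  PySem.Str.startswith content "---" = true →
  PySem.Str.findFrom content "---" 3 ≠ -1 →
  (((PySem.Str.split?
       (PySem.Str.slice content (some 3) (some (PySem.Str.findFrom content "---" 3)))
       "\n").getD []).map PySem.Str.strip).countP
    (fun s => PySem.Str.startswith s "sources:") ≤ 1
instance (content : String) : Decidable (Pre_count_sources_from_frontmatter_py content) := by
  unfold Pre_count_sources_from_frontmatter_py; infer_instance

def pvWitness_count_sources_from_frontmatter_py : String := "---\nsources:\n- a\n- b\n---"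

def Spec_count_sources_from_frontmatter_py (content : String) (out : Int) : Prop := out = count_sources_from_frontmatter_py_alt content
instance (content : String) (out : Int) : Decidable (Spec_count_sources_from_frontmatter_py content out) := by unfold Spec_count_sources_from_frontmatter_py; infer_instance

-- ===== CLAIM (what is proved, stated in full; the proofs are below) =====
def Claim_equal_count_sources_from_frontmatter_py : Prop := ∀ (content : String), Dom_count_sources_from_frontmatter_py content → Pre_count_sources_from_frontmatter_py content → Spec_count_sources_from_frontmatter_py content (count_sources_from_frontmatter_py content)

-- ===== LEMMAS AND PROOFS =====

-- the counting phase: with the flag set and no further header lines, A counts exactly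
-- the "- " lines of B's block
lemma csfLoopA_true (ls : List String) (c : Int)
    (h : ∀ l ∈ ls, PySem.Str.startswith (PySem.Str.strip l) "sources:" = false) :
    csfLoopA ls true c =
      c + ((csfBlock (ls.map PySem.Str.strip)).countP
        (fun s => PySem.Str.startswith s "- ") : Int) := by
  induction ls generalizing c with
  | nil => simp [csfLoopA, csfBlock]
  | cons l rest ih =>
    simp only [csfLoopA, List.map_cons]
    have hns := h l (by simp)
    rw [if_neg (by rw [hns]; simp), if_pos trivial]
    have hrest : ∀ x ∈ rest, PySem.Str.startswith (PySem.Str.strip x) "sources:" = false :=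
      fun x hx => h x (by simp [hx])
    by_cases h2 : PySem.Str.startswith (PySem.Str.strip l) "- " = true
    · rw [if_pos h2]
      unfold csfBlock
      rw [if_neg (fun hh => hh.2.2 h2), ih _ hrest]
      simp only [List.countP_cons, h2, if_true]
      push_cast
      ring
    · rw [if_neg h2]
      have h2f : PySem.Str.startswith (PySem.Str.strip l) "- " = false := by
        revert h2; cases PySem.Str.startswith (PySem.Str.strip l) "- " <;> simp
      by_cases h3 : PySem.Str.strip l ≠ "" ∧ ¬ (PySem.Str.startswith (PySem.Str.strip l) "#" = true)
      · rw [if_pos h3]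
        unfold csfBlock
        rw [if_pos ⟨h3.1, h3.2, h2⟩]
        simp
      · rw [if_neg h3]
        unfold csfBlock
        rw [if_neg (fun hh => h3 ⟨hh.1, hh.2.1⟩), ih _ hrest]
        simp only [List.countP_cons, h2f]
        simp

-- the seeking phase: A before the header equals B's findIdx?-based decomposition,
-- given at most one header line
lemma csfLoopA_false (ls : List String)
    (h : (ls.map PySem.Str.strip).countP
      (fun s => PySem.Str.startswith s "sources:") ≤ 1) :
    csfLoopA ls false 0 =
      (match (ls.map PySem.Str.strip).findIdx?
          (fun s => PySem.Str.startswith s "sources:") with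
       | none => 0
       | some i =>
         ((csfBlock ((ls.map PySem.Str.strip).drop (i + 1))).countP
           (fun s => PySem.Str.startswith s "- ") : Int)) := by
  induction ls with
  | nil => simp [csfLoopA]
  | cons l rest ih =>
    simp only [List.map_cons, List.countP_cons] at h
    simp only [csfLoopA, List.map_cons, List.findIdx?_cons]
    by_cases h1 : PySem.Str.startswith (PySem.Str.strip l) "sources:" = true
    · simp only [h1, if_true] at h ⊢
      have hz : (rest.map PySem.Str.strip).countP
          (fun s => PySem.Str.startswith s "sources:") = 0 := by omega
      have hnone : ∀ x ∈ rest, PySem.Str.startswith (PySem.Str.strip x) "sources:" = false := by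
        intro x hx
        have := List.countP_eq_zero.mp hz (PySem.Str.strip x) (List.mem_map_of_mem hx)
        simpa using this
      rw [csfLoopA_true rest 0 hnone]
      simp
    · have h1f : PySem.Str.startswith (PySem.Str.strip l) "sources:" = false := by
        revert h1; cases PySem.Str.startswith (PySem.Str.strip l) "sources:" <;> simp
      simp only [h1f] at h ⊢
      have hrest : (rest.map PySem.Str.strip).countP
          (fun s => PySem.Str.startswith s "sources:") ≤ 1 := by omega
      rw [ih hrest]
      cases hf : (rest.map PySem.Str.strip).findIdx?
          (fun s => PySem.Str.startswith s "sources:") with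
      | none => simp
      | some i => simp

-- ===== VERDICT (by name: the statement is the Claim_ definition above) =====
theorem count_sources_from_frontmatter_py_spec : Claim_equal_count_sources_from_frontmatter_py := by
  intro content _ hpre
  unfold Spec_count_sources_from_frontmatter_py
  unfold count_sources_from_frontmatter_py count_sources_from_frontmatter_py_alt
  by_cases h0 : PySem.Str.startswith content "---" = true
  · rw [if_neg (not_not_intro h0), if_neg (not_not_intro h0)]
    by_cases h1 : PySem.Str.findFrom content "---" 3 = -1
    · rw [if_pos h1, if_pos h1]
    · rw [if_neg h1, if_neg h1, csfLoopA_false _ (hpre h0 h1)]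
  · rw [if_pos h0, if_pos h0]
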